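-- pv_equiv track=rewrite | github.com/Pyk017/Competetive-Programming | Code_Chef/COVID_Pandemic_and_Long_Queue.py | pandemic
-- ===== SOURCE A (Python) =====
-- def pandemic(arr, n):
--     temp = 0
--     diff = 0
--     count = 0
--     for i, j in enumerate(arr):
--         if j == 1:
--             count += 1
--             diff = i - temp
--             if diff < 6 and count > 1:
--                 return 'NO'
--             temp = i
--
--     return 'YES'
-- ===== SOURCE B (Python) =====
-- def pandemic(arr, n):
--     for i in range(len(arr)):
--         if arr[i] == 1 and 1 in arr[i+1:i+6]:
--             return 'NO'
--     return 'YES'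
-- ===== Notes on version B (the rewrite author's own statement) =====
-- stated objective: simpler
-- what changed: Drops A's streaming state (last seated index, gap, seat count) entirely: B tests a purely local condition per position -- a seated spot with another 1 in the next-five-cells window arr[i+1:i+6] -- correct because any two seats closer than 6 are witnessed by such a window.
import Mathlib
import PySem

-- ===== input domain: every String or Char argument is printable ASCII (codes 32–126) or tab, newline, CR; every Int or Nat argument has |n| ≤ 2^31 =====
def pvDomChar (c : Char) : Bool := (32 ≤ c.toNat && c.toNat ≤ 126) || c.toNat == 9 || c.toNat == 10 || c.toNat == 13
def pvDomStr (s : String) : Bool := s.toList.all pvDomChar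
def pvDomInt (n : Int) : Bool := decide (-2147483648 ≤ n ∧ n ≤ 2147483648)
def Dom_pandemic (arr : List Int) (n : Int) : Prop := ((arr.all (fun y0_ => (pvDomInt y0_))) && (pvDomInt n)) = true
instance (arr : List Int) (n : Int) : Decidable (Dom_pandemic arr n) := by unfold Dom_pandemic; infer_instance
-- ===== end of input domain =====

-- B replaces A's fused streaming loop (last-seat index / gap / count state) by a stateless
-- per-index test: seated spot with another 1 inside the five-cell slice after it; return value only.


-- ===== PORT A =====
-- the for-loop over enumerate(arr) with state (temp, count) and early return; `diff` is the let inside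
def pandemicLoop : List (Int × Int) → Int → Int → String
  | [], _, _ => "YES"
  | (i, j) :: rest, temp, count =>
    if j = 1 then
      let count' := count + 1
      let diff := i - temp
      if diff < 6 ∧ count' > 1 then "NO"
      else pandemicLoop rest i count'
    else pandemicLoop rest temp count

def pandemic (arr : List Int) (_n : Int) : String :=
  pandemicLoop (PySem.List.enumerate arr) 0 0

-- ===== PORT B =====
-- for i in range(len(arr)): if arr[i] == 1 and 1 in arr[i+1:i+6]: return 'NO' … return 'YES'
-- (arr[i] with i from range(len(arr)) never raises, so pyGet? … = some 1 is exact)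
def altLoop (arr : List Int) : List Int → String
  | [] => "YES"
  | i :: rest =>
    if PySem.List.pyGet? arr i = some 1 ∧ (1 : Int) ∈ PySem.List.slice arr (some (i + 1)) (some (i + 6))
    then "NO" else altLoop arr rest

def pandemic_alt (arr : List Int) (_n : Int) : String :=
  altLoop arr (PySem.List.pyRange 0 arr.length 1)

-- ===== PRECONDITION & SPEC =====
def Spec_pandemic (arr : List Int) (n : Int) (out : String) : Prop := out = pandemic_alt arr n
instance (arr : List Int) (n : Int) (out : String) : Decidable (Spec_pandemic arr n out) := by unfold Spec_pandemic; infer_instance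

-- ===== CLAIM (what is proved, stated in full; the proofs are below) =====
def Claim_equal_pandemic : Prop := ∀ (arr : List Int) (n : Int), Dom_pandemic arr n → Spec_pandemic arr n (pandemic arr n)

-- ===== LEMMAS AND PROOFS =====

-- the common meeting point: suffix view of B's test — head seated and a 1 within the next five
def altGo : List Int → String
  | [] => "YES"
  | x :: t => if x = 1 ∧ (1 : Int) ∈ t.take 5 then "NO" else altGo t

-- A's loop after the first seat, re-expressed on bare values with the gap to the last seat
def aGap : Nat → List Int → String
  | _, [] => "YES"
  | g, x :: t => if x = 1 then (if g < 6 then "NO" else aGap 1 t) else aGap (g + 1) t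

theorem aGap_ge6 (xs : List Int) : ∀ g : Nat, 6 ≤ g → aGap g xs = aGap 6 xs := by
  induction xs with
  | nil => intro g _; rfl
  | cons x t ih =>
    intro g hg
    by_cases hx : x = 1
    · simp [aGap, hx, Nat.not_lt.mpr hg]
    · simp only [aGap, hx, if_false]
      rw [ih (g + 1) (by omega), ih 7 (by omega)]

theorem aGap_eq (xs : List Int) : ∀ g : Nat, 1 ≤ g → g ≤ 6 →
    aGap g xs = if (1 : Int) ∈ xs.take (6 - g) then "NO" else altGo xs := by
  induction xs with
  | nil => intro g _ _; simp [aGap, altGo]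
  | cons x t ih =>
    intro g h1 h6
    by_cases hx : x = 1
    · subst hx
      by_cases hlt : g < 6
      · have hmem : (1 : Int) ∈ (1 :: t).take (6 - g) := by
          have h65 : 6 - g = (5 - g) + 1 := by omega
          rw [h65, List.take_succ_cons]; exact List.mem_cons_self
        simp [aGap, hlt, hmem]
      · have hg6 : g = 6 := by omega
        subst hg6
        simp only [aGap, if_true, hlt, if_false]
        rw [ih 1 (by omega) (by omega)]
        simp [altGo]
    · simp only [aGap, hx, if_false]
      by_cases hlt : g < 6
      · rw [ih (g + 1) (by omega) (by omega)]
        have ht : (x :: t).take (6 - g) = x :: t.take (5 - g) := by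
          have h65 : 6 - g = (5 - g) + 1 := by omega
          rw [h65, List.take_succ_cons]
        have h56 : 6 - (g + 1) = 5 - g := by omega
        rw [ht, h56]
        simp [altGo, List.mem_cons, Ne.symm hx, hx]
      · have hg6 : g = 6 := by omega
        subst hg6
        rw [aGap_ge6 t 7 (by omega), ih 6 (by omega) (by omega)]
        simp [altGo, hx]

-- A's loop in the seen state (count ≥ 1, last seat at index temp < k) over enumerate-from-k
theorem loop_seen (xs : List Int) : ∀ (k temp c : Int), 1 ≤ c → temp < k →
    pandemicLoop (PySem.List.enumerate xs k) temp c = aGap (k - temp).toNat xs := by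
  induction xs with
  | nil => intro k temp c _ _; simp [PySem.List.enumerate, pandemicLoop, aGap]
  | cons x t ih =>
    intro k temp c hc hk
    rw [PySem.List.enumerate_cons]
    by_cases hx : x = 1
    · simp only [pandemicLoop, hx, if_true]
      have hgt : c + 1 > 1 := by omega
      by_cases hd : k - temp < 6
      · have h6 : (k - temp).toNat < 6 := by omega
        simp [hgt, hd, aGap, h6]
      · have h6 : ¬ (k - temp).toNat < 6 := by omega
        simp only [hd, hgt, and_true, if_false]
        rw [ih (k + 1) k (c + 1) (by omega) (by omega)]
        have h1 : (k + 1 - k).toNat = 1 := by omega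
        rw [h1]
        simp [aGap, h6]
    · simp only [pandemicLoop, hx, if_false]
      rw [ih (k + 1) temp c hc (by omega)]
      have hsucc : (k + 1 - temp).toNat = (k - temp).toNat + 1 := by omega
      simp [aGap, hx, hsucc]

-- A's loop before any seat is seen
theorem loop_unseen (xs : List Int) : ∀ (k temp : Int),
    pandemicLoop (PySem.List.enumerate xs k) temp 0 = altGo xs := by
  induction xs with
  | nil => intro k temp; simp [PySem.List.enumerate, pandemicLoop, altGo]
  | cons x t ih =>
    intro k temp
    rw [PySem.List.enumerate_cons]
    by_cases hx : x = 1
    · simp only [pandemicLoop, hx, if_true]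
      have hno : ¬ ((k - temp < 6) ∧ ((0 : Int) + 1 > 1)) := by omega
      simp only [hno, if_false]
      have h01 : (0 : Int) + 1 = 1 := by norm_num
      rw [h01, loop_seen t (k + 1) k 1 (by omega) (by omega)]
      have h1 : (k + 1 - k).toNat = 1 := by omega
      rw [h1, aGap_eq t 1 (by omega) (by omega)]
      simp [altGo]
    · simp only [pandemicLoop, hx, if_false]
      rw [ih (k + 1) temp]
      simp [altGo, hx]

-- B's indexed loop over range(len) equals the suffix view
theorem alt_eq (suf : List Int) : ∀ pre : List Int,
    altLoop (pre ++ suf) (PySem.List.pyRange pre.length ((pre ++ suf).length : Nat) 1) = altGo suf := by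
  induction suf with
  | nil =>
    intro pre
    have : PySem.List.pyRange (pre.length : Int) ((pre ++ ([] : List Int)).length : Nat) 1 = [] := by
      simp [PySem.List.pyRange]
    rw [this]; rfl
  | cons x t ih =>
    intro pre
    have hcons : PySem.List.pyRange ((pre.length : Nat) : Int) ((pre ++ x :: t).length : Nat) 1
        = ((pre.length : Nat) : Int) :: PySem.List.pyRange (((pre.length : Nat) : Int) + 1) ((pre ++ x :: t).length : Nat) 1 :=
      PySem.List.pyRange_one_cons (by simp)
    rw [hcons]
    simp only [altLoop]
    have hget : PySem.List.pyGet? (pre ++ x :: t) (pre.length : Int) = some x :=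
      PySem.List.pyGet?_append_length pre t x
    have hslice : PySem.List.slice (pre ++ x :: t) (some ((pre.length : Int) + 1)) (some ((pre.length : Int) + 6))
        = t.take 5 := by
      have e1 : ((pre.length : Int) + 1) = (((pre.length + 1 : Nat)) : Int) := by push_cast; ring
      have e2 : ((pre.length : Int) + 6) = (((pre.length + 6 : Nat)) : Int) := by push_cast; ring
      rw [e1, e2, PySem.List.slice_natCast]
      have hdrop : (pre ++ x :: t).drop (pre.length + 1) = t := by
        rw [show pre.length + 1 = (pre ++ [x]).length by simp, show pre ++ x :: t = (pre ++ [x]) ++ t by simp]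
        exact List.drop_left
      rw [hdrop]
      congr 1
      omega
    rw [hget, hslice]
    simp only [Option.some.injEq]
    have hsplit : altGo (x :: t) = if x = 1 ∧ (1 : Int) ∈ t.take 5 then "NO" else altGo t := rfl
    rw [hsplit]
    by_cases hc : x = 1 ∧ (1 : Int) ∈ t.take 5
    · simp [hc]
    · simp only [hc, if_false]
      have hre := ih (pre ++ [x])
      rw [show (pre ++ [x]) ++ t = pre ++ x :: t by simp] at hre
      rw [show (((pre ++ [x]).length : Nat) : Int) = ((pre.length : Nat) : Int) + 1 by simp] at hre
      exact hre

-- ===== VERDICT (by name: the statement is the Claim_ definition above) =====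
theorem pandemic_spec : Claim_equal_pandemic := by
  intro arr n _
  unfold Spec_pandemic pandemic pandemic_alt
  rw [loop_unseen arr 0 0]
  have := alt_eq arr []
  simpa using this.symm
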